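-- pv_equiv track=rewrite | github.com/smy37/Daily_Coding | Nx5.py | GetMaxScore
-- ===== SOURCE A (Python) =====
-- def GetMaxScore(scores):
--     # Write your code here
--     answer = 0
--     n = len(scores)
--     dp = [[0 for i in range(n)], [0 for i in range(n)]]
--     if n == 1:
--         answer = max(0,scores[0])
--     dp[0][0] = scores[0]    ## Not Skip
--     dp[1][0] = 0            ## Skip
--
--     for i in range(1, n):
--         for j in range(2):
--             if j == 0:  ## Not Skip
--                 dp[0][i] = max(dp[0][i-1]+scores[i], dp[1][i-1]+scores[i])
--             elif j == 1:    ## Skip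
--                 dp[1][i] = dp[0][i-1]
--
--     answer = max(dp[0][n-1], dp[1][n-1])
--     return answer
-- ===== SOURCE B (Python) =====
-- def GetMaxScore(scores):
--     # Divide-and-conquer over (max,+) "transfer matrices".
--     # For a segment s, its matrix m = (PP, PQ, QP, QQ) maps suffix bests (p, q)
--     # to segment-prefixed bests, where p = best with the next element free to
--     # skip, q = best with the next element forced taken. None stands for -inf.
--     def add(a, b):
--         return None if a is None or b is None else a + b
--
--     def mx(a, b):
--         if a is None:
--             return b
--         if b is None:
--             return a
--         return max(a, b)
--
--     def mul(m, n):
--         a0, a1, a2, a3 = m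
--         b0, b1, b2, b3 = n
--         return (mx(add(a0, b0), add(a1, b2)),
--                 mx(add(a0, b1), add(a1, b3)),
--                 mx(add(a2, b0), add(a3, b2)),
--                 mx(add(a2, b1), add(a3, b3)))
--
--     def seg(lo, hi):  # matrix of scores[lo:hi], hi - lo >= 1
--         if hi - lo == 1:
--             x = scores[lo]
--             return (x, 0, x, None)
--         mid = (lo + hi) // 2
--         return mul(seg(lo, mid), seg(mid, hi))
--
--     if not scores:
--         return 0
--     m = seg(0, len(scores))
--     return mx(m[0], m[1])
-- ===== Notes on version B (the rewrite author's own statement) =====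
-- stated objective: alternative
-- what changed: Replaces A's left-to-right two-row DP table by a divide-and-conquer reduction: each element becomes a 2x2 (max,+) transfer matrix, segments are combined by associative max-plus matrix multiplication on halves, and the answer is read off the root matrix.
-- crash fix: On the empty list A raises IndexError (scores[0]); B returns 0, the best score of an empty selection. — e.g. on GetMaxScore([]): A raises IndexError, B returns 0
import Mathlib
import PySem

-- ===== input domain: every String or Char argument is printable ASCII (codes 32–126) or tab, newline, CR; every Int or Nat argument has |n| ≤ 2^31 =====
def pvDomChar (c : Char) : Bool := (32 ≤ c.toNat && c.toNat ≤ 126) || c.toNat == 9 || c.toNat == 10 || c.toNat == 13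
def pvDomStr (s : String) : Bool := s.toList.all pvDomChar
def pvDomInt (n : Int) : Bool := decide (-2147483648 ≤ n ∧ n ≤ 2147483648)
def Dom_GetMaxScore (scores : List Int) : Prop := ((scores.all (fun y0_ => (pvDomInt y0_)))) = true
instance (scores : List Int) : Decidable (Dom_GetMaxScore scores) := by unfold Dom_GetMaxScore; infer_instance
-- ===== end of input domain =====

-- B replaces A's two-row forward DP table by a divide-and-conquer reduction over
-- 2x2 (max,+) transfer matrices (one per element, segments combined by max-plus
-- matrix multiplication); an 'alternative' algorithm of the same O(n) cost.


-- ===== PORT A =====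
def GetMaxScore (scores : List Int) : Int :=
  let n : Int := (scores.length : Int)
  -- dp = [[0]*n, [0]*n]
  let dp0 : List Int := (PySem.List.pyRange 0 n 1).map (fun _ => (0 : Int))
  let dp1 : List Int := (PySem.List.pyRange 0 n 1).map (fun _ => (0 : Int))
  -- 'answer = 0; if n == 1: answer = max(0, scores[0])' — overwritten unconditionally below
  let _answer : Int := if n = 1 then max 0 (PySem.List.pyGetD scores 0 0) else 0
  let dp0 := PySem.List.pySetD dp0 0 (PySem.List.pyGetD scores 0 0)   -- dp[0][0] = scores[0]
  let dp1 := PySem.List.pySetD dp1 0 0                                -- dp[1][0] = 0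
  let st :=
    (PySem.List.pyRange 1 n 1).foldl (fun (st : List Int × List Int) i =>
      (PySem.List.pyRange 0 2 1).foldl (fun (st : List Int × List Int) j =>
        if j = 0 then
          (PySem.List.pySetD st.1 i
             (max (PySem.List.pyGetD st.1 (i-1) 0 + PySem.List.pyGetD scores i 0)
                  (PySem.List.pyGetD st.2 (i-1) 0 + PySem.List.pyGetD scores i 0)), st.2)
        else if j = 1 then
          (st.1, PySem.List.pySetD st.2 i (PySem.List.pyGetD st.1 (i-1) 0))
        else st) st) (dp0, dp1)
  max (PySem.List.pyGetD st.1 (n-1) 0) (PySem.List.pyGetD st.2 (n-1) 0)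

-- ===== PORT B =====
-- entries are Option Int, 'none' standing for Python's None (= -infinity)
def pvOAdd (a b : Option Int) : Option Int :=
  match a, b with
  | some a, some b => some (a + b)
  | _, _ => none

def pvOMax (a b : Option Int) : Option Int :=
  match a, b with
  | none, b => b
  | a, none => a
  | some a, some b => some (max a b)

def pvMatMul (m n : Option Int × Option Int × Option Int × Option Int) :
    Option Int × Option Int × Option Int × Option Int :=
  (pvOMax (pvOAdd m.1 n.1) (pvOAdd m.2.1 n.2.2.1),
   pvOMax (pvOAdd m.1 n.2.1) (pvOAdd m.2.1 n.2.2.2),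
   pvOMax (pvOAdd m.2.2.1 n.1) (pvOAdd m.2.2.2 n.2.2.1),
   pvOMax (pvOAdd m.2.2.1 n.2.1) (pvOAdd m.2.2.2 n.2.2.2))

-- 'seg(lo, hi)': the base guard is 'hi - lo ≤ 1' (a totality guard; B only calls it with lo < hi,
-- where it coincides with Python's 'hi - lo == 1')
def pvSeg (scores : List Int) (lo hi : Nat) : Option Int × Option Int × Option Int × Option Int :=
  if hi - lo ≤ 1 then
    let x := PySem.List.pyGetD scores (lo : Int) 0
    (some x, some 0, some x, none)
  else
    pvMatMul (pvSeg scores lo ((lo + hi) / 2)) (pvSeg scores ((lo + hi) / 2) hi)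
termination_by hi - lo
decreasing_by all_goals omega

def GetMaxScore_alt (scores : List Int) : Int :=
  if scores = [] then 0
  else
    let m := pvSeg scores 0 scores.length
    (pvOMax m.1 m.2.1).getD 0   -- mx(m[0], m[1]); both entries are non-None here

-- ===== PRECONDITION & SPEC =====
-- Pre_ excludes only the empty list, on which A raises IndexError (scores[0]).
def Pre_GetMaxScore (scores : List Int) : Prop := scores ≠ []
instance (scores : List Int) : Decidable (Pre_GetMaxScore scores) := by unfold Pre_GetMaxScore; infer_instance
def pvWitness_GetMaxScore : List Int := [3, -1, 4]

-- On the empty list A raises IndexError at 'scores[0]'; B returns 0 (the empty selection).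
def Raises_GetMaxScore (scores : List Int) : Prop := scores = []
instance (scores : List Int) : Decidable (Raises_GetMaxScore scores) := by unfold Raises_GetMaxScore; infer_instance
def pvRaiseWitness_GetMaxScore : List Int := []
def pvRaiseWitnessOut_GetMaxScore : Int := 0

def Spec_GetMaxScore (scores : List Int) (out : Int) : Prop := out = GetMaxScore_alt scores
instance (scores : List Int) (out : Int) : Decidable (Spec_GetMaxScore scores out) := by unfold Spec_GetMaxScore; infer_instance

-- ===== CLAIM (what is proved, stated in full; the proofs are below) =====
def Claim_equal_GetMaxScore : Prop := ∀ (scores : List Int), Dom_GetMaxScore scores → Pre_GetMaxScore scores → Spec_GetMaxScore scores (GetMaxScore scores)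
def Claim_raises_GetMaxScore : Prop := (∀ (scores : List Int), Dom_GetMaxScore scores → Raises_GetMaxScore scores → ¬ Pre_GetMaxScore scores) ∧ (Dom_GetMaxScore (pvRaiseWitness_GetMaxScore) ∧ Raises_GetMaxScore (pvRaiseWitness_GetMaxScore) ∧ GetMaxScore_alt (pvRaiseWitness_GetMaxScore) = pvRaiseWitnessOut_GetMaxScore)

-- ===== LEMMAS AND PROOFS =====

-- ---- A side: reduce the table DP to a rolling pair (F_{i-1}, F_i) ----

-- A's outer-loop body after evaluating the inner j-loop (range(2) = [0,1])
def aStep (scores : List Int) (st : List Int × List Int) (i : Int) : List Int × List Int :=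
  let d0 := PySem.List.pySetD st.1 i
      (max (PySem.List.pyGetD st.1 (i-1) 0 + PySem.List.pyGetD scores i 0)
           (PySem.List.pyGetD st.2 (i-1) 0 + PySem.List.pyGetD scores i 0))
  (d0, PySem.List.pySetD st.2 i (PySem.List.pyGetD d0 (i-1) 0))

-- rolling-pair forward step
def bStep (p : Int × Int) (x : Int) : Int × Int := (p.2, x + max p.2 p.1)

-- A's initial dp rows (literally the port's initial state)
def aInit (scores : List Int) : List Int × List Int :=
  (PySem.List.pySetD ((PySem.List.pyRange 0 (scores.length : Int) 1).map (fun _ => (0 : Int))) 0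
     (PySem.List.pyGetD scores 0 0),
   PySem.List.pySetD ((PySem.List.pyRange 0 (scores.length : Int) 1).map (fun _ => (0 : Int))) 0 0)

lemma getD_set_self (l : List Int) (n : Nat) (v d : Int) (h : n < l.length) :
    (l.set n v).getD n d = v := by
  simp [List.getD, h]

lemma getD_set_ne (l : List Int) (m n : Nat) (v d : Int) (h : m ≠ n) :
    (l.set m v).getD n d = l.getD n d := by
  simp [List.getD, List.getElem?_set_ne h]

lemma inner_eq (scores : List Int) (st : List Int × List Int) (i : Int) :
    (PySem.List.pyRange 0 2 1).foldl (fun (st : List Int × List Int) j =>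
        if j = 0 then
          (PySem.List.pySetD st.1 i
             (max (PySem.List.pyGetD st.1 (i-1) 0 + PySem.List.pyGetD scores i 0)
                  (PySem.List.pyGetD st.2 (i-1) 0 + PySem.List.pyGetD scores i 0)), st.2)
        else if j = 1 then
          (st.1, PySem.List.pySetD st.2 i (PySem.List.pyGetD st.1 (i-1) 0))
        else st) st = aStep scores st i := by
  have h : PySem.List.pyRange 0 2 1 = [0, 1] := by decide
  rw [h]
  simp [List.foldl, aStep]

lemma GetMaxScore_eq_loop (scores : List Int) :
    GetMaxScore scores =
      max (PySem.List.pyGetD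
            ((PySem.List.pyRange 1 (scores.length : Int) 1).foldl (aStep scores) (aInit scores)).1
            ((scores.length : Int) - 1) 0)
          (PySem.List.pyGetD
            ((PySem.List.pyRange 1 (scores.length : Int) 1).foldl (aStep scores) (aInit scores)).2
            ((scores.length : Int) - 1) 0) := by
  unfold GetMaxScore aInit
  simp only [inner_eq]

lemma aInit_cons (a b : Int) (rest : List Int) :
    aInit (a :: b :: rest) =
      ((List.replicate (rest.length + 2) (0 : Int)).set 0 a,
       (List.replicate (rest.length + 2) (0 : Int)).set 0 0) := by
  unfold aInit
  rw [PySem.List.pyGetD_zero_cons]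
  rw [show (0:Int) = ((0:Nat) : Int) from rfl]
  rw [PySem.List.pySetD_natCast, PySem.List.pySetD_natCast]
  simp [List.map_const', PySem.List.length_pyRange_one]
  have hn : ((rest.length : Int) + 1 + 1).toNat = rest.length + 2 := by omega
  rw [hn]
  exact ⟨rfl, rfl⟩

lemma aStep_natCast (scores : List Int) (st : List Int × List Int) (m : Nat) (h1 : 1 ≤ m) :
    aStep scores st (m : Int) =
      ((st.1.set m (max (st.1.getD (m-1) 0 + scores.getD m 0) (st.2.getD (m-1) 0 + scores.getD m 0))),
       st.2.set m ((st.1.set m (max (st.1.getD (m-1) 0 + scores.getD m 0)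
          (st.2.getD (m-1) 0 + scores.getD m 0))).getD (m-1) 0)) := by
  unfold aStep
  have hm : ((m : Int) - 1) = ((m - 1 : Nat) : Int) := by omega
  rw [hm]
  simp

lemma loopInv (a b : Int) (rest : List Int) :
    ∀ m : Nat, 2 ≤ m → m ≤ rest.length + 2 →
    (((PySem.List.pyRange 1 (m : Int) 1).foldl (aStep (a :: b :: rest)) (aInit (a :: b :: rest))).1.length
        = rest.length + 2) ∧
    (((PySem.List.pyRange 1 (m : Int) 1).foldl (aStep (a :: b :: rest)) (aInit (a :: b :: rest))).2.length
        = rest.length + 2) ∧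
    (((PySem.List.pyRange 1 (m : Int) 1).foldl (aStep (a :: b :: rest)) (aInit (a :: b :: rest))).1.getD (m-1) 0
        = ((rest.take (m - 2)).foldl bStep (a, b + max a 0)).2) ∧
    (((PySem.List.pyRange 1 (m : Int) 1).foldl (aStep (a :: b :: rest)) (aInit (a :: b :: rest))).2.getD (m-1) 0
        = ((rest.take (m - 2)).foldl bStep (a, b + max a 0)).1) := by
  intro m h2
  induction m, h2 using Nat.le_induction with
  | base =>
    intro hm
    have hrange : PySem.List.pyRange 1 ((2:Nat) : Int) 1 = [1] := by decide
    rw [hrange]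
    rw [aInit_cons]
    simp only [List.foldl]
    have h1 : (1:Int) = ((1:Nat) : Int) := rfl
    rw [h1, aStep_natCast _ _ 1 (by omega)]
    have hlen : ((List.replicate (rest.length + 2) (0:Int)).set 0 a).length = rest.length + 2 := by simp
    have hlen2 : ((List.replicate (rest.length + 2) (0:Int)).set 0 0).length = rest.length + 2 := by simp
    have hg0 : ((List.replicate (rest.length + 2) (0:Int)).set 0 a).getD 0 0 = a :=
      getD_set_self _ _ _ _ (by simp)
    have hg0' : ((List.replicate (rest.length + 2) (0:Int)).set 0 0).getD 0 0 = 0 :=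
      getD_set_self _ _ _ _ (by simp)
    simp only [hg0, hg0']
    have hs1 : (a :: b :: rest).getD 1 0 = b := rfl
    rw [hs1]
    refine ⟨by simp, by simp, ?_, ?_⟩
    · rw [getD_set_self _ _ _ _ (by simp)]
      simp [max_def]
      split_ifs <;> omega
    · rw [getD_set_self _ _ _ _ (by simp), getD_set_ne _ _ _ _ _ (by omega), hg0]
      rfl
  | succ m h2 ih =>
    intro hm1
    obtain ⟨k, rfl⟩ : ∃ k, m = k + 2 := ⟨m - 2, by omega⟩
    have hk : k < rest.length := by omega
    have hmle : (k + 2) ≤ rest.length + 2 := by omega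
    obtain ⟨ih1, ih2, ih3, ih4⟩ := ih hmle
    have hcast : (((k + 2 + 1 : Nat)) : Int) = ((k + 2 : Nat) : Int) + 1 := by push_cast; ring
    rw [hcast, PySem.List.pyRange_one_succ_right (by omega), List.foldl_append]
    simp only [List.foldl]
    rw [aStep_natCast _ _ (k + 2) (by omega)]
    set st := (PySem.List.pyRange 1 ((k + 2 : Nat) : Int) 1).foldl (aStep (a :: b :: rest))
        (aInit (a :: b :: rest)) with hst
    have hsm : (a :: b :: rest).getD (k + 2) 0 = rest.getD k 0 := rfl
    have hrk : rest.getD k 0 = rest[k] := List.getD_eq_getElem rest 0 hk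
    have htake : rest.take (k + 2 + 1 - 2) = rest.take k ++ [rest[k]] := by
      have : k + 2 + 1 - 2 = k + 1 := by omega
      rw [this, List.take_add_one, List.getElem?_eq_getElem hk]
      rfl
    have hidx : k + 2 + 1 - 1 = k + 2 := by omega
    have hidx2 : k + 2 - 1 = k + 1 := by omega
    rw [htake, List.foldl_append]
    simp only [List.foldl, hidx]
    set P := (rest.take (k + 2 - 2)).foldl bStep (a, b + max a 0) with hP
    have hPk : (rest.take k).foldl bStep (a, b + max a 0) = P := by
      rw [hP]; norm_num
    rw [hPk]
    rw [hsm, hrk] at *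
    rw [hidx2] at ih3 ih4
    refine ⟨by simp [ih1], by simp [ih2], ?_, ?_⟩
    · rw [getD_set_self _ _ _ _ (by omega), hidx2, ih3, ih4]
      simp [bStep, max_def]
      split_ifs <;> omega
    · rw [getD_set_self _ _ _ _ (by omega), getD_set_ne _ _ _ _ _ (by omega), hidx2, ih3]
      rfl

lemma GetMaxScore_single (a : Int) : GetMaxScore [a] = max a 0 := by
  simp [GetMaxScore, PySem.List.pySetD, PySem.List.pySet?, PySem.List.pyGetD,
        PySem.List.pyGet?, PySem.List.pyIdx?]

-- ---- B side: the transfer matrices compute the backward (suffix) DP ----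

-- backward step: pq = (best with next position free, best with next position forced taken)
def pqStep (x : Int) (pq : Int × Int) : Int × Int := (max (x + pq.1) pq.2, x + pq.1)

-- apply a transfer matrix to a (finite) suffix-value vector
def applyV (m : Option Int × Option Int × Option Int × Option Int) (v : Int × Int) : Int × Int :=
  ((pvOMax (pvOAdd m.1 (some v.1)) (pvOAdd m.2.1 (some v.2))).getD 0,
   (pvOMax (pvOAdd m.2.2.1 (some v.1)) (pvOAdd m.2.2.2 (some v.2))).getD 0)

-- every matrix produced by pvSeg has its PP, PQ, QP entries finite
def MInv (m : Option Int × Option Int × Option Int × Option Int) : Prop :=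
  m.1.isSome ∧ m.2.1.isSome ∧ m.2.2.1.isSome

lemma mInv_mul (m n : Option Int × Option Int × Option Int × Option Int)
    (hm : MInv m) (hn : MInv n) : MInv (pvMatMul m n) := by
  obtain ⟨a0, ha0⟩ := Option.isSome_iff_exists.mp hm.1
  obtain ⟨a1, ha1⟩ := Option.isSome_iff_exists.mp hm.2.1
  obtain ⟨a2, ha2⟩ := Option.isSome_iff_exists.mp hm.2.2
  obtain ⟨b0, hb0⟩ := Option.isSome_iff_exists.mp hn.1
  obtain ⟨b1, hb1⟩ := Option.isSome_iff_exists.mp hn.2.1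
  obtain ⟨b2, hb2⟩ := Option.isSome_iff_exists.mp hn.2.2
  unfold MInv pvMatMul
  cases m.2.2.2 <;> cases n.2.2.2 <;>
    simp [ha0, ha1, ha2, hb0, hb1, hb2, pvOAdd, pvOMax]

lemma apply_mul (m n : Option Int × Option Int × Option Int × Option Int)
    (hm : MInv m) (hn : MInv n) (v : Int × Int) :
    applyV (pvMatMul m n) v = applyV m (applyV n v) := by
  obtain ⟨a0, ha0⟩ := Option.isSome_iff_exists.mp hm.1
  obtain ⟨a1, ha1⟩ := Option.isSome_iff_exists.mp hm.2.1
  obtain ⟨a2, ha2⟩ := Option.isSome_iff_exists.mp hm.2.2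
  obtain ⟨b0, hb0⟩ := Option.isSome_iff_exists.mp hn.1
  obtain ⟨b1, hb1⟩ := Option.isSome_iff_exists.mp hn.2.1
  obtain ⟨b2, hb2⟩ := Option.isSome_iff_exists.mp hn.2.2
  unfold applyV pvMatMul
  cases m.2.2.2 <;> cases n.2.2.2 <;>
    simp [ha0, ha1, ha2, hb0, hb1, hb2, pvOAdd, pvOMax, Prod.ext_iff, max_def] <;>
    constructor <;> (split_ifs <;> omega)

lemma seg_spec (scores : List Int) :
    ∀ k lo hi, hi - lo ≤ k → lo < hi → hi ≤ scores.length →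
      MInv (pvSeg scores lo hi) ∧
      ∀ v, applyV (pvSeg scores lo hi) v = ((scores.drop lo).take (hi - lo)).foldr pqStep v := by
  intro k
  induction k with
  | zero => intro lo hi h hlt _; omega
  | succ k ih =>
    intro lo hi hle hlt hhi
    by_cases hbase : hi - lo ≤ 1
    · have hhi1 : hi = lo + 1 := by omega
      rw [pvSeg, if_pos hbase]
      have hlo : lo < scores.length := by omega
      have hget : PySem.List.pyGetD scores (lo : Int) 0 = scores[lo] := by
        rw [PySem.List.pyGetD_natCast]
        exact List.getD_eq_getElem scores 0 hlo
      have htake : (scores.drop lo).take (hi - lo) = [scores[lo]] := by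
        rw [hhi1]
        simp
        rw [List.take_one, List.head?_drop, List.getElem?_eq_getElem hlo]
        rfl
      constructor
      · exact ⟨rfl, rfl, rfl⟩
      · intro v
        rw [htake]
        simp [applyV, pvOAdd, pvOMax, pqStep, List.foldr, List.getElem?_eq_getElem hlo]
    · rw [pvSeg, if_neg hbase]
      have hmid1 : lo < (lo + hi) / 2 := by omega
      have hmid2 : (lo + hi) / 2 < hi := by omega
      obtain ⟨hL1, hL2⟩ := ih lo ((lo + hi) / 2) (by omega) hmid1 (by omega)
      obtain ⟨hR1, hR2⟩ := ih ((lo + hi) / 2) hi (by omega) hmid2 hhi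
      refine ⟨mInv_mul _ _ hL1 hR1, ?_⟩
      intro v
      rw [apply_mul _ _ hL1 hR1, hR2, hL2]
      rw [← List.foldr_append]
      congr 1
      have hdd : (scores.drop lo).drop ((lo + hi) / 2 - lo) = scores.drop ((lo + hi) / 2) := by
        rw [List.drop_drop]
        congr 1
        omega
      rw [← hdd, ← List.take_add]
      congr 1
      omega

-- B's result is the first component of the backward fold over the whole list
lemma alt_eq_foldr (scores : List Int) (h : scores ≠ []) :
    GetMaxScore_alt scores = (scores.foldr pqStep (0, 0)).1 := by
  unfold GetMaxScore_alt
  rw [if_neg h]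
  have hlen : 0 < scores.length := List.length_pos_iff.mpr h
  obtain ⟨hinv, happ⟩ := seg_spec scores scores.length 0 scores.length (by omega) hlen (le_refl _)
  have := happ (0, 0)
  simp only [List.drop_zero, Nat.sub_zero, List.take_length] at this
  rw [← this]
  obtain ⟨a0, ha0⟩ := Option.isSome_iff_exists.mp hinv.1
  obtain ⟨a1, ha1⟩ := Option.isSome_iff_exists.mp hinv.2.1
  simp [applyV, pvOAdd, pvOMax, ha0, ha1]

-- forward/backward bridge: the rolling pair against the suffix pair
lemma fwd_bwd (s : List Int) : ∀ u v : Int,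
    max (s.foldl bStep (u, v)).2 (s.foldl bStep (u, v)).1
      = max (v + (s.foldr pqStep (0, 0)).1) (u + (s.foldr pqStep (0, 0)).2) := by
  induction s with
  | nil => intro u v; simp [List.foldl, List.foldr]
  | cons x s' ih =>
    intro u v
    simp only [List.foldl, List.foldr, bStep]
    rw [ih]
    simp only [pqStep]
    simp [max_def]
    split_ifs <;> omega

-- ===== VERDICT (by name: the statement is the Claim_ definition above) =====
theorem GetMaxScore_raises : Claim_raises_GetMaxScore := by
  unfold Claim_raises_GetMaxScore
  exact ⟨fun scores _ hr hp => hp hr, by decide⟩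

theorem GetMaxScore_spec : Claim_equal_GetMaxScore := by
  intro scores hdom hpre
  unfold Spec_GetMaxScore
  match scores with
  | [] => exact absurd hpre (GetMaxScore_raises.1 [] hdom rfl)
  | [a] =>
    rw [GetMaxScore_single, alt_eq_foldr _ (by simp)]
    simp [List.foldr, pqStep]
  | a :: b :: rest =>
    rw [GetMaxScore_eq_loop]
    have hlen : ((a :: b :: rest).length : Int) = ((rest.length + 2 : Nat) : Int) := by
      simp; omega
    rw [hlen]
    obtain ⟨_, _, h3, h4⟩ := loopInv a b rest (rest.length + 2) (by omega) (by omega)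
    have hidx : ((rest.length + 2 : Nat) : Int) - 1 = ((rest.length + 1 : Nat) : Int) := by push_cast; ring
    rw [hidx]
    rw [PySem.List.pyGetD_natCast, PySem.List.pyGetD_natCast]
    have e3 := h3
    have e4 := h4
    simp only [show rest.length + 2 - 1 = rest.length + 1 from by omega,
               show rest.length + 2 - 2 = rest.length from by omega, List.take_length] at e3 e4
    rw [e3, e4]
    rw [fwd_bwd]
    rw [alt_eq_foldr _ (by simp)]
    simp only [List.foldr, pqStep]
    simp [max_def]
    split_ifs <;> omega
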